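-- pv_equiv track=rewrite | github.com/Yucheng-An/LeetCode | myLeetCode/632.py | find
-- ===== SOURCE A (Python) =====
-- def find(il):
--     if len(il) == 1:
--         return None
--     if il[-1] - il[-2] == 1:
--         il.pop()
--         return find(il)
--     else:
--         return il[-1] - 1
-- ===== SOURCE B (Python) =====
-- def find(il):
--     ans = None
--     for i in range(len(il) - 1):
--         if il[i + 1] - il[i] != 1:
--             ans = il[i + 1] - 1
--     return ans
-- ===== Notes on version B (the rewrite author's own statement) =====
-- stated objective: simpler
-- what changed: A recursively pops the last element while the suffix is consecutive (mutating its argument); B makes one forward pass keeping the value after the last break, no recursion and no mutation.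
import Mathlib
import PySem

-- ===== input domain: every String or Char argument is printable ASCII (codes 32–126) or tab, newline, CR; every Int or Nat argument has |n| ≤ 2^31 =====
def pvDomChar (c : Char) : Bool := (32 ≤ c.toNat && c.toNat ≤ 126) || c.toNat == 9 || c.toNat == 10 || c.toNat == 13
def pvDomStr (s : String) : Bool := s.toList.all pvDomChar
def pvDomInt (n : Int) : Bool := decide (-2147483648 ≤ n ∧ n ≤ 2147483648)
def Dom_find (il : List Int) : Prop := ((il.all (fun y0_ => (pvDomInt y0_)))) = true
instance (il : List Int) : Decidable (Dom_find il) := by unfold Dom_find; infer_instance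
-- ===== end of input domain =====

-- A pops from the back while the suffix is consecutive (mutating its argument) and recurses;
-- B is a single non-mutating forward pass remembering the value after the last break.
-- Equivalence is about the RETURN value only: A mutates il in place, B does not.

-- ===== PORT A =====
def find (il : List Int) : Option Int :=
  if il.length = 1 then none
  else
    match h1 : PySem.List.pyGet? il (-1), PySem.List.pyGet? il (-2) with
    | some a, some b =>
      if a - b = 1 then find il.dropLast else some (a - 1)
    | _, _ => none   -- il = [] : Python raises IndexError here (excluded by Pre_find)
termination_by il.length
decreasing_by
  have hne : il ≠ [] := by
    intro h; subst h; simp [PySem.List.pyGet?] at h1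
  simp only [List.length_dropLast]
  have : 0 < il.length := List.length_pos_iff.mpr hne
  omega

-- ===== PORT B =====
def find_alt (il : List Int) : Option Int :=
  (PySem.List.pyRange 0 ((il.length : Int) - 1) 1).foldl
    (fun ans i =>
      if PySem.List.pyGetD il (i + 1) 0 - PySem.List.pyGetD il i 0 ≠ 1 then
        some (PySem.List.pyGetD il (i + 1) 0 - 1)
      else ans)
    none

-- ===== PRECONDITION & SPEC =====
-- Pre_find excludes only the empty list, on which A raises IndexError (il[-1]).
def Pre_find (il : List Int) : Prop := il ≠ []
instance (il : List Int) : Decidable (Pre_find il) := by unfold Pre_find; infer_instance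
def pvWitness_find : List Int := [3, 5, 6]

def Spec_find (il : List Int) (out : Option Int) : Prop := out = find_alt il
instance (il : List Int) (out : Option Int) : Decidable (Spec_find il out) := by unfold Spec_find; infer_instance

-- ===== CLAIM (what is proved, stated in full; the proofs are below) =====
def Claim_equal_find : Prop := ∀ (il : List Int), Dom_find il → Pre_find il → Spec_find il (find il)

-- ===== LEMMAS AND PROOFS =====

theorem alt_step (il : List Int) (h2 : 2 ≤ il.length) :
    find_alt il =
      if il[il.length - 1]'(by omega) - il[il.length - 2]'(by omega) ≠ 1 then
        some (il[il.length - 1]'(by omega) - 1)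
      else find_alt il.dropLast := by
  have hsplit : PySem.List.pyRange 0 ((il.length : Int) - 1) 1
      = PySem.List.pyRange 0 ((il.length : Int) - 2) 1 ++ [((il.length : Int) - 2)] := by
    have : ((il.length : Int) - 1) = ((il.length : Int) - 2) + 1 := by ring
    rw [this]
    exact PySem.List.pyRange_one_succ_right (by omega)
  conv_lhs => unfold find_alt
  rw [hsplit, List.foldl_append]
  simp only [List.foldl_cons, List.foldl_nil]
  have hg1 : PySem.List.pyGetD il (((il.length : Int) - 2) + 1) 0 = il[il.length - 1]'(by omega) := by
    rw [PySem.List.pyGetD_eq_getElem il 0 (by omega) (by omega)]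
    congr 1; omega
  have hg2 : PySem.List.pyGetD il ((il.length : Int) - 2) 0 = il[il.length - 2]'(by omega) := by
    rw [PySem.List.pyGetD_eq_getElem il 0 (by omega) (by omega)]
    congr 1; omega
  rw [hg1, hg2]
  have hlen : ((il.dropLast.length : Int) - 1) = ((il.length : Int) - 2) := by
    simp [List.length_dropLast]; omega
  have hpref :
      (PySem.List.pyRange 0 ((il.length : Int) - 2) 1).foldl
        (fun ans i =>
          if PySem.List.pyGetD il (i + 1) 0 - PySem.List.pyGetD il i 0 ≠ 1 then
            some (PySem.List.pyGetD il (i + 1) 0 - 1)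
          else ans) none = find_alt il.dropLast := by
    unfold find_alt
    rw [hlen]
    apply PySem.List.foldl_congr_mem
    intro acc x hx
    have hxr := (PySem.List.mem_pyRange_one).mp hx
    have hd1 : PySem.List.pyGetD il (x + 1) 0 = PySem.List.pyGetD il.dropLast (x + 1) 0 := by
      rw [PySem.List.pyGetD_eq_getElem il 0 (by omega) (by omega),
          PySem.List.pyGetD_eq_getElem il.dropLast 0 (by omega) (by simp only [List.length_dropLast]; omega)]
      rw [List.getElem_dropLast]
    have hd2 : PySem.List.pyGetD il x 0 = PySem.List.pyGetD il.dropLast x 0 := by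
      rw [PySem.List.pyGetD_eq_getElem il 0 (by omega) (by omega),
          PySem.List.pyGetD_eq_getElem il.dropLast 0 (by omega) (by simp only [List.length_dropLast]; omega)]
      rw [List.getElem_dropLast]
    rw [hd1, hd2]
  rw [hpref]

theorem find_eq_alt : ∀ (il : List Int), il ≠ [] → find il = find_alt il := by
  intro il hne
  induction hn : il.length using Nat.strong_induction_on generalizing il with
  | _ n IH =>
  by_cases h1 : il.length = 1
  · rw [find]
    rw [if_pos h1]
    unfold find_alt
    rw [show ((il.length : Int) - 1) = 0 by omega]
    simp [PySem.List.pyRange_one_eq_nil le_rfl]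
  · have hlen : 2 ≤ il.length := by
      have := List.length_pos_iff.mpr hne; omega
    rw [find, if_neg h1]
    rw [PySem.List.pyGet?_neg_ofNat il 1 (by omega) (by omega),
        PySem.List.pyGet?_neg_ofNat il 2 (by omega) (by omega)]
    rw [List.getElem?_eq_getElem (by omega), List.getElem?_eq_getElem (by omega)]
    simp only []
    rw [alt_step il hlen]
    by_cases hd : il[il.length - 1]'(by omega) - il[il.length - 2]'(by omega) = 1
    · rw [if_pos hd, if_neg (by simpa using hd)]
      have hdl : il.dropLast ≠ [] := by
        intro h
        have := congrArg List.length h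
        simp [List.length_dropLast] at this
        omega
      exact IH il.dropLast.length (by simp [List.length_dropLast]; omega) il.dropLast hdl rfl
    · rw [if_neg hd, if_pos (by simpa using hd)]

-- ===== VERDICT (by name: the statement is the Claim_ definition above) =====
theorem find_spec : Claim_equal_find := by
  intro il _ hpre
  exact find_eq_alt il hpre
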